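-- pv_equiv track=rewrite | github.com/GunukLyoo/Algorithm-practice | programmers/lv0/특정 문자열로 끝나는 가장 긴 부분 문자열 찾기.py | solution
-- ===== SOURCE A (Python) =====
-- def solution(myString, pat):
--     answer = ''
--     li = list(myString)
--     pl = list(pat)
--     for i in range(len(li)-1, -1, -1):
--         if pl == li[i-len(pat)+1:i+1]:
--             li = li[:i+1]
--             break
--     for i in li:
--         answer += i
--     return answer
-- ===== SOURCE B (Python) =====
-- def solution(myString, pat):
--     cut = len(myString)
--     for i in range(len(myString) + 1):
--         if myString.startswith(pat, i):
--             cut = i + len(pat)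
--     return myString[:cut]
-- ===== Notes on version B (the rewrite author's own statement) =====
-- stated objective: alternative
-- what changed: Replaces A's backward loop (per-position slice comparison, break, char-by-char string rebuild) by a single forward pass that records the end of the last position where str.startswith matches, then takes one slice; no early exit, no list-to-string rebuild.
import Mathlib
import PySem

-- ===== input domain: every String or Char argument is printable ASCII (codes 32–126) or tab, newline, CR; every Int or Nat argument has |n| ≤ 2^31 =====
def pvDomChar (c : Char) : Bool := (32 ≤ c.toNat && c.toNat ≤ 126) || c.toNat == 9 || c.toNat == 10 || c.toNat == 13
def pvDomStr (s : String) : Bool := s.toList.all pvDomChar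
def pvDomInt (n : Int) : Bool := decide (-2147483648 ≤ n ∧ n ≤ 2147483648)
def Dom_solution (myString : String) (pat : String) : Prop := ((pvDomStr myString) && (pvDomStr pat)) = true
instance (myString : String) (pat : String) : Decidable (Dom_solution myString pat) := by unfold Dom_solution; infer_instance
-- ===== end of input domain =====

-- B replaces A's backward loop (slice comparison, break, char-by-char rebuild) by a single
-- forward pass recording the end of the last startswith match, then one slice; returns proved equal.

-- ===== PORT A =====
-- the backward `for i in range(len(li)-1, -1, -1)` loop with break, as structural
-- recursion on the counter j+1 (the body sees i = j, counting down from len-1 to 0)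
def pvLoopA (pl s : List Char) : Nat → List Char
  | 0 => s
  | j + 1 =>
    if pl = PySem.List.slice s (some ((j : Int) - pl.length + 1)) (some ((j : Int) + 1)) then
      PySem.List.slice s none (some ((j : Int) + 1))
    else pvLoopA pl s j

def solution (myString : String) (pat : String) : String :=
  let li := myString.toList
  let pl := pat.toList
  let li2 := pvLoopA pl li li.length
  li2.foldl (fun acc c => acc ++ String.singleton c) ""

-- ===== PORT B =====
-- forward pass: `for i in range(len(myString) + 1): if myString.startswith(pat, i): cut = i + len(pat)`
-- (startswith(pat, i) with 0 ≤ i is exactly pat.isPrefixOf (s.drop i), also when i + len(pat) > len(s))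
def pvCutB (s p : List Char) : Nat :=
  (List.range (s.length + 1)).foldl
    (fun cut i => if p.isPrefixOf (s.drop i) then i + p.length else cut) s.length

-- myString[:cut] with cut ≥ 0 is exactly take cut
def solution_alt (myString : String) (pat : String) : String :=
  String.ofList (myString.toList.take (pvCutB myString.toList pat.toList))

-- ===== PRECONDITION & SPEC =====
def Spec_solution (myString : String) (pat : String) (out : String) : Prop := out = solution_alt myString pat
instance (myString : String) (pat : String) (out : String) : Decidable (Spec_solution myString pat out) := by unfold Spec_solution; infer_instance

-- ===== CLAIM (what is proved, stated in full; the proofs are below) =====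
def Claim_equal_solution : Prop := ∀ (myString : String) (pat : String), Dom_solution myString pat → Spec_solution myString pat (solution myString pat)

-- ===== LEMMAS AND PROOFS =====

-- proof-side notion: rightmost index k' ≤ k with p a prefix of s.drop k', or -1
def pvRfindFrom (s p : List Char) : Nat → Int
  | 0 => if p.isPrefixOf s then (0 : Int) else -1
  | k + 1 => if p.isPrefixOf (s.drop (k + 1)) then ((k + 1 : Nat) : Int) else pvRfindFrom s p k

def pvRfind (s p : List Char) : Int :=
  if p.length ≤ s.length then pvRfindFrom s p (s.length - p.length) else -1

-- below the break position (i + 1 < len(pat)) A's slice is too short to equal pat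
theorem pvLoopA_short (pl s : List Char) (j : Nat) (hj : j < pl.length) :
    pvLoopA pl s j = s := by
  induction j with
  | zero => rfl
  | succ j ih =>
    rw [pvLoopA]
    have hne : pl ≠ PySem.List.slice s (some ((j : Int) - pl.length + 1)) (some ((j : Int) + 1)) := by
      intro h
      have hlen := congrArg List.length h
      rw [PySem.List.length_slice] at hlen
      have hb : ((j : Int) + 1) = ((j + 1 : Nat) : Int) := by push_cast; ring
      rw [hb, PySem.List.clampIdx_natCast] at hlen
      omega
    rw [if_neg hne]
    exact ih (by omega)

-- loop/search correspondence: running A's loop down from counter k + m equals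
-- truncating at the rfind-from-k result (m = len(pat) ≥ 1)
theorem pvLoopA_rfind (pl s : List Char) (hm : 0 < pl.length) (k : Nat) :
    pvLoopA pl s (k + pl.length) =
      if pvRfindFrom s pl k = -1 then s
      else s.take ((pvRfindFrom s pl k).toNat + pl.length) := by
  induction k with
  | zero =>
    have hsucc : 0 + pl.length = (pl.length - 1) + 1 := by omega
    rw [hsucc, pvLoopA, pvRfindFrom]
    simp only [List.isPrefixOf_iff_prefix]
    have h1 : (((pl.length - 1 : Nat) : Int) - pl.length + 1) = ((0 : Nat) : Int) := by omega
    have h2 : (((pl.length - 1 : Nat) : Int) + 1) = ((0 : Nat) : Int) + ((pl.length : Nat) : Int) := by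
      omega
    rw [h1, h2, PySem.List.slice_natCast_add, List.drop_zero]
    by_cases hp : pl <+: s
    · rw [if_pos (List.prefix_iff_eq_take.mp hp), if_pos hp,
        if_neg (by omega : ¬ ((0 : Int) = -1))]
      have h3 : ((0 : Nat) : Int) + ((pl.length : Nat) : Int) = ((pl.length : Nat) : Int) := by omega
      rw [h3, PySem.List.slice_to_natCast]
      simp
    · rw [if_neg (fun h => hp (by rw [h]; exact List.take_prefix _ _)), if_neg hp, if_pos rfl]
      exact pvLoopA_short pl s (pl.length - 1) (by omega)
  | succ k ih =>
    have hsucc : (k + 1) + pl.length = (k + pl.length) + 1 := by omega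
    rw [hsucc, pvLoopA, pvRfindFrom]
    simp only [List.isPrefixOf_iff_prefix]
    have h1 : (((k + pl.length : Nat) : Int) - pl.length + 1) = ((k + 1 : Nat) : Int) := by omega
    have h2 : (((k + pl.length : Nat) : Int) + 1) = ((k + 1 : Nat) : Int) + ((pl.length : Nat) : Int) := by
      omega
    rw [h1, h2, PySem.List.slice_natCast_add]
    by_cases hp : pl <+: s.drop (k + 1)
    · rw [if_pos (List.prefix_iff_eq_take.mp hp), if_pos hp,
        if_neg (by omega : ¬ (((k + 1 : Nat) : Int) = -1))]
      have h3 : ((k + 1 : Nat) : Int) + ((pl.length : Nat) : Int) = ((k + 1 + pl.length : Nat) : Int) := by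
        omega
      rw [h3, PySem.List.slice_to_natCast]
      simp
    · rw [if_neg (fun h => hp (by rw [h]; exact List.take_prefix _ _)), if_neg hp]
      exact ih

theorem pvRfindFrom_empty (s : List Char) (k : Nat) : pvRfindFrom s [] k = k := by
  induction k with
  | zero => simp [pvRfindFrom]
  | succ k ih => simp [pvRfindFrom]

-- for empty pat, A's loop breaks on its first iteration
theorem pvLoopA_nil (s : List Char) (j : Nat) : pvLoopA [] s (j + 1) = s.take (j + 1) := by
  rw [pvLoopA]
  have h1 : ((j : Int) - (([] : List Char).length : Int) + 1) = ((j + 1 : Nat) : Int) := by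
    simp
  have h2 : ((j : Int) + 1) = ((j + 1 : Nat) : Int) := by omega
  rw [h2, h1]
  rw [if_pos (by rw [PySem.List.slice_natCast]; simp)]
  rw [PySem.List.slice_to_natCast]

-- A's char-by-char rebuild is String.ofList
theorem pvFoldl_push (l : List Char) (acc : String) :
    l.foldl (fun a c => a ++ String.singleton c) acc = acc ++ String.ofList l := by
  induction l generalizing acc with
  | nil => simp
  | cons c l ih =>
    rw [List.foldl_cons, ih]
    apply String.ext
    simp

-- B's forward foldl over range (K+1) computes the same truncation point as pvRfindFrom K
theorem pvFoldl_range_rfind (s p : List Char) (init : Nat) (K : Nat) :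
    (List.range (K + 1)).foldl
        (fun cut i => if p.isPrefixOf (s.drop i) then i + p.length else cut) init =
      if pvRfindFrom s p K = -1 then init else (pvRfindFrom s p K).toNat + p.length := by
  induction K with
  | zero =>
    simp only [List.range_succ, List.range_zero, List.nil_append, List.foldl_cons, List.foldl_nil,
      pvRfindFrom, List.drop_zero]
    by_cases hp : p.isPrefixOf s
    · rw [if_pos hp, if_pos hp, if_neg (by omega : ¬ ((0 : Int) = -1))]
      simp
    · rw [if_neg hp, if_neg hp, if_pos rfl]
  | succ K ih =>
    rw [List.range_succ, List.foldl_append, List.foldl_cons, List.foldl_nil, ih, pvRfindFrom]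
    by_cases hp : p.isPrefixOf (s.drop (K + 1))
    · rw [if_pos hp, if_pos hp, if_neg (by omega : ¬ (((K + 1 : Nat) : Int) = -1))]
      simp
    · rw [if_neg hp, if_neg hp]

-- one stabilization step: beyond len - m the prefix test fails (p nonempty)
theorem pvRfindFrom_step (s p : List Char) (hp : 0 < p.length) (k : Nat)
    (h : s.length < (k + 1) + p.length) :
    pvRfindFrom s p (k + 1) = pvRfindFrom s p k := by
  rw [pvRfindFrom, if_neg]
  intro hpre
  have := List.IsPrefix.length_le (List.isPrefixOf_iff_prefix.mp hpre)
  rw [List.length_drop] at this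
  omega

theorem pvRfindFrom_stable (s p : List Char) (hp : 0 < p.length) (k : Nat)
    (h : s.length ≤ k + p.length) (d : Nat) :
    pvRfindFrom s p (k + d) = pvRfindFrom s p k := by
  induction d with
  | zero => rfl
  | succ d ih =>
    have : k + (d + 1) = (k + d) + 1 := by omega
    rw [this, pvRfindFrom_step s p hp (k + d) (by omega), ih]

-- scanning all the way to len agrees with pvRfind
theorem pvRfindFrom_len (s p : List Char) : pvRfindFrom s p s.length = pvRfind s p := by
  rcases Nat.eq_zero_or_pos p.length with hm | hm
  · have hp0 : p = [] := List.eq_nil_of_length_eq_zero hm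
    subst hp0
    rw [pvRfind, if_pos (by simp), pvRfindFrom_empty, pvRfindFrom_empty]
    simp
  · by_cases hn : p.length ≤ s.length
    · rw [pvRfind, if_pos hn]
      have : s.length = (s.length - p.length) + (s.length - (s.length - p.length)) := by omega
      conv_lhs => rw [this]
      exact pvRfindFrom_stable s p hm _ (by omega) _
    · rw [pvRfind, if_neg hn]
      have h0 : s.length = 0 + s.length := by omega
      conv_lhs => rw [h0]
      rw [pvRfindFrom_stable s p hm 0 (by omega), pvRfindFrom, if_neg]
      intro hpre
      have := List.IsPrefix.length_le (List.isPrefixOf_iff_prefix.mp hpre)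
      omega

-- A's final loop vs pvRfind, at the list level
theorem pvLoopA_eq_rfind (s pl : List Char) :
    pvLoopA pl s s.length =
      if pvRfind s pl = -1 then s
      else s.take ((pvRfind s pl).toNat + pl.length) := by
  rcases Nat.eq_zero_or_pos pl.length with hm | hm
  · have hpl : pl = [] := List.eq_nil_of_length_eq_zero hm
    subst hpl
    rw [pvRfind, if_pos (show ([] : List Char).length ≤ s.length by simp)]
    simp only [List.length_nil, Nat.sub_zero, Nat.add_zero]
    rw [pvRfindFrom_empty]
    rw [if_neg (by omega : ¬ ((s.length : Int) = -1))]
    simp only [Int.toNat_natCast]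
    cases hn : s.length with
    | zero => rw [pvLoopA]; simp [List.eq_nil_of_length_eq_zero hn]
    | succ j => rw [pvLoopA_nil, ← hn, List.take_length]
  · by_cases hn : pl.length ≤ s.length
    · have hk : s.length = (s.length - pl.length) + pl.length := by omega
      rw [pvRfind, if_pos hn]
      conv_lhs => rw [hk]
      exact pvLoopA_rfind pl s hm (s.length - pl.length)
    · rw [pvRfind, if_neg hn, if_pos rfl]
      exact pvLoopA_short pl s s.length (by omega)

-- B's cut as a function of pvRfind
theorem pvCutB_eq (s p : List Char) :
    pvCutB s p = if pvRfind s p = -1 then s.length else (pvRfind s p).toNat + p.length := by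
  rw [pvCutB, pvFoldl_range_rfind, pvRfindFrom_len]

-- ===== VERDICT (by name: the statement is the Claim_ definition above) =====
theorem solution_spec : Claim_equal_solution := by
  intro ms pat _
  unfold Spec_solution solution solution_alt
  simp only
  rw [pvLoopA_eq_rfind, pvFoldl_push, pvCutB_eq]
  by_cases hneg : pvRfind ms.toList pat.toList = -1
  · rw [if_pos hneg, if_pos hneg, List.take_length]
    apply String.ext
    simp
  · rw [if_neg hneg, if_neg hneg]
    apply String.ext
    simp
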